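-- pv_equiv track=rewrite | github.com/mortyc126-debug/SHA-256 | bit_entropy_proxy.py | count_up
-- ===== SOURCE A (Python) =====
-- def count_up(clauses, n, fixed):
--     """Count how many bits get forced by unit propagation."""
--     f = dict(fixed)
--     forced = 0
--     changed = True
--     while changed:
--         changed = False
--         for clause in clauses:
--             satisfied = False; free = []
--             for v, s in clause:
--                 if v in f:
--                     if (s==1 and f[v]==1) or (s==-1 and f[v]==0):
--                         satisfied = True; break
--                 else: free.append((v,s))
--             if not satisfied and len(free) == 1:
--                 v, s = free[0]
--                 if v not in f:
--                     f[v] = 1 if s==1 else 0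
--                     forced += 1; changed = True
--     return forced, f
-- ===== SOURCE B (Python) =====
-- def count_up(clauses, n, fixed):
--     """Counter-based unit propagation: per-clause (sat, free-count, free-sums) records
--     plus a var->occurrence index, so forcing a bit updates only the clauses containing it
--     and each pass checks every clause in O(1)."""
--     f = dict(fixed)
--     st = []          # per clause i: [sat, cnt, sumv, sums] over its currently-free literals
--     occ = {}         # var -> list of (clause_index, sign) for its initially-free occurrences
--     for i, clause in enumerate(clauses):
--         sat = False; cnt = 0; sv = 0; ss = 0
--         for v, s in clause:
--             if v in f:
--                 if (s == 1 and f[v] == 1) or (s == -1 and f[v] == 0):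
--                     sat = True
--             else:
--                 cnt += 1; sv += v; ss += s
--                 occ.setdefault(v, []).append((i, s))
--         st.append([sat, cnt, sv, ss])
--     forced = 0
--     changed = True
--     while changed:
--         changed = False
--         for i in range(len(st)):
--             rec = st[i]
--             if not rec[0] and rec[1] == 1:
--                 v, s = rec[2], rec[3]      # the unique free literal (sums collapse to it)
--                 val = 1 if s == 1 else 0
--                 f[v] = val
--                 forced += 1; changed = True
--                 for j, t in occ.get(v, ()):
--                     r2 = st[j]
--                     r2[1] -= 1; r2[2] -= v; r2[3] -= t
--                     if (t == 1 and val == 1) or (t == -1 and val == 0):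
--                         r2[0] = True
--     return forced, f
-- ===== Notes on version B (the rewrite author's own statement) =====
-- stated objective: alternative
-- what changed: B replaces A's rescan-every-literal fixpoint passes by counter-based unit propagation: each clause keeps a (satisfied, free-count, free-sums) record and a var->clause occurrence index is built once, so a pass checks each clause in O(1) and forcing a bit updates only the clauses containing it.
import Mathlib
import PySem

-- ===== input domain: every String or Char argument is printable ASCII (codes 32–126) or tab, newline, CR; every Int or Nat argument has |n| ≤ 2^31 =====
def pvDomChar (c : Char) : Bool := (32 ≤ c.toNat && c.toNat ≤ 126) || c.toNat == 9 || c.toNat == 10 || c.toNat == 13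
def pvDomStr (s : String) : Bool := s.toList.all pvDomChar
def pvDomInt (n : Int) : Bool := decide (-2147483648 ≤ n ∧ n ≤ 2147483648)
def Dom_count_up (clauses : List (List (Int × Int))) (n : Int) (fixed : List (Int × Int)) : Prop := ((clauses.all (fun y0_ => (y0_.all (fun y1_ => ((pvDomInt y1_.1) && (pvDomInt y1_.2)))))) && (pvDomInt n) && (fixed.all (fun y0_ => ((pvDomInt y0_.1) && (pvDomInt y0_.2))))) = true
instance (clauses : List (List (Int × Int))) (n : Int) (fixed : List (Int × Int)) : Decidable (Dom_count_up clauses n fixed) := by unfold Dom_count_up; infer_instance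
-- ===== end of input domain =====

-- B replaces A's rescan-every-literal fixpoint passes by counter-based unit propagation:
-- per-clause (satisfied, free-count, free-sums) records plus a var→occurrence index built once,
-- so a pass checks each clause in O(1) and forcing a bit touches only the clauses containing it.

-- ===== PORT A =====
-- inner 'for v, s in clause' loop with break: returns (satisfied, free)
def aScan (f : PySem.Dict Int Int) : List (Int × Int) → Bool × List (Int × Int)
  | [] => (false, [])
  | (v, s) :: rest =>
    match f.get? v with
    | some fv =>
        if (s == 1 && fv == 1) || (s == -1 && fv == 0) then (true, [])
        else aScan f rest
    | none =>
        let r := aScan f rest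
        (r.1, (v, s) :: r.2)

-- one 'for clause in clauses' pass over the state (f, forced, changed)
def aPass (f : PySem.Dict Int Int) (forced : Int) (changed : Bool) :
    List (List (Int × Int)) → PySem.Dict Int Int × Int × Bool
  | [] => (f, forced, changed)
  | clause :: rest =>
    let r := aScan f clause
    if !r.1 && r.2.length == 1 then
      match r.2 with
      | (v, s) :: _ =>
          if (f.get? v).isNone then
            aPass (f.insert v (if s == 1 then 1 else 0)) (forced + 1) true rest
          else aPass f forced changed rest
      | [] => aPass f forced changed rest
    else aPass f forced changed rest

-- 'while changed' loop; fuel (total number of literals + 1) is a termination guard only: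
-- every pass that continues inserts at least one new key drawn from the clause literals,
-- so the Python loop runs at most that many passes and the guard is never the reason to stop.
def aLoop (clauses : List (List (Int × Int))) :
    Nat → PySem.Dict Int Int → Int → Int × PySem.Dict Int Int
  | 0, f, forced => (forced, f)
  | fuel + 1, f, forced =>
    let r := aPass f forced false clauses
    if r.2.2 then aLoop clauses fuel r.1 r.2.1 else (r.2.1, r.1)

def count_up (clauses : List (List (Int × Int))) (n : Int) (fixed : List (Int × Int)) : Int × (List (Int × Int)) :=
  let f := PySem.Dict.ofList fixed
  let r := aLoop clauses ((clauses.map (·.length)).sum + 1) f 0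
  (r.1, r.2.items)

-- ===== PORT B =====
-- init scan of one literal: updates the clause record (sat, cnt, sumv, sums) and the
-- occurrence index occ (var → list of (clause index, sign) of its initially-free occurrences)
def bScanLit (f : PySem.Dict Int Int) (i : Nat)
    (acc : (Bool × Int × Int × Int) × PySem.Dict Int (List (Nat × Int))) (l : Int × Int) :
    (Bool × Int × Int × Int) × PySem.Dict Int (List (Nat × Int)) :=
  match f.get? l.1 with
  | some fv =>
      if (l.2 == 1 && fv == 1) || (l.2 == -1 && fv == 0) then ((true, acc.1.2), acc.2) else acc
  | none =>
      ((acc.1.1, acc.1.2.1 + 1, acc.1.2.2.1 + l.1, acc.1.2.2.2 + l.2),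
       acc.2.insert l.1 (acc.2.getD l.1 [] ++ [(i, l.2)]))

-- 'for i, clause in enumerate(clauses)': build the records list and the occurrence index
def bInit (f : PySem.Dict Int Int) :
    Nat → List (List (Int × Int)) → List (Bool × Int × Int × Int) →
    PySem.Dict Int (List (Nat × Int)) →
    List (Bool × Int × Int × Int) × PySem.Dict Int (List (Nat × Int))
  | _, [], st, occ => (st, occ)
  | i, c :: cs, st, occ =>
    let r := c.foldl (bScanLit f i) ((false, 0, 0, 0), occ)
    bInit f (i + 1) cs (st ++ [r.1]) r.2

-- 'for j, t in occ.get(v, ())' body: one occurrence update after forcing v := val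
def bUpd (v val : Int) (st : List (Bool × Int × Int × Int)) (p : Nat × Int) :
    List (Bool × Int × Int × Int) :=
  st.modify p.1 (fun q =>
    (q.1 || ((p.2 == 1 && val == 1) || (p.2 == -1 && val == 0)),
     q.2.1 - 1, q.2.2.1 - v, q.2.2.2 - p.2))

-- 'for i in range(len(st))' pass: O(1) per clause via the records
def bPass (occ : PySem.Dict Int (List (Nat × Int))) :
    List Nat → PySem.Dict Int Int → Int → Bool → List (Bool × Int × Int × Int) →
    PySem.Dict Int Int × Int × Bool × List (Bool × Int × Int × Int)
  | [], f, forced, changed, st => (f, forced, changed, st)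
  | i :: is, f, forced, changed, st =>
    let q := st.getD i (true, 0, 0, 0)
    if !q.1 && q.2.1 == 1 then
      let v := q.2.2.1
      let val : Int := if q.2.2.2 == 1 then 1 else 0
      bPass occ is (f.insert v val) (forced + 1) true ((occ.getD v []).foldl (bUpd v val) st)
    else bPass occ is f forced changed st

-- 'while changed'; same fuel guard as in A's port (total number of literals + 1)
def bLoop (occ : PySem.Dict Int (List (Nat × Int))) :
    Nat → PySem.Dict Int Int → Int → List (Bool × Int × Int × Int) →
    Int × PySem.Dict Int Int
  | 0, f, forced, _ => (forced, f)
  | fuel + 1, f, forced, st =>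
    let r := bPass occ (List.range st.length) f forced false st
    if r.2.2.1 then bLoop occ fuel r.1 r.2.1 r.2.2.2 else (r.2.1, r.1)

def count_up_alt (clauses : List (List (Int × Int))) (n : Int) (fixed : List (Int × Int)) : Int × (List (Int × Int)) :=
  let f := PySem.Dict.ofList fixed
  let r := bInit f 0 clauses [] PySem.Dict.empty
  let out := bLoop r.2 ((clauses.map (·.length)).sum + 1) f 0 r.1
  (out.1, out.2.items)

-- ===== PRECONDITION & SPEC =====
def Spec_count_up (clauses : List (List (Int × Int))) (n : Int) (fixed : List (Int × Int)) (out : Int × (List (Int × Int))) : Prop := out = count_up_alt clauses n fixed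
instance (clauses : List (List (Int × Int))) (n : Int) (fixed : List (Int × Int)) (out : Int × (List (Int × Int))) : Decidable (Spec_count_up clauses n fixed out) := by unfold Spec_count_up; infer_instance

-- ===== CLAIM (what is proved, stated in full; the proofs are below) =====
def Claim_equal_count_up : Prop := ∀ (clauses : List (List (Int × Int))) (n : Int) (fixed : List (Int × Int)), Dom_count_up clauses n fixed → Spec_count_up clauses n fixed (count_up clauses n fixed)

-- ===== LEMMAS AND PROOFS =====

-- 'v in f and ((s == 1 and f[v] == 1) or (s == -1 and f[v] == 0))'
def litSat (f : PySem.Dict Int Int) (l : Int × Int) : Bool :=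
  match f.get? l.1 with
  | some fv => (l.2 == 1 && fv == 1) || (l.2 == -1 && fv == 0)
  | none => false

-- 'v not in f'
def isFree (f : PySem.Dict Int Int) (l : Int × Int) : Bool := !(f.contains l.1)

def freeL (f : PySem.Dict Int Int) (c : List (Int × Int)) : List (Int × Int) :=
  c.filter (isFree f)

-- the record B keeps for one clause, expressed from the current assignment
def spec1 (f : PySem.Dict Int Int) (c : List (Int × Int)) : Bool × Int × Int × Int :=
  (c.any (litSat f), ((freeL f c).length : Int),
   ((freeL f c).map (·.1)).sum, ((freeL f c).map (·.2)).sum)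

-- occurrence lists B's init builds, expressed from the clauses
def clauseOcc (f : PySem.Dict Int Int) (i : Nat) (c : List (Int × Int)) (w : Int) :
    List (Nat × Int) :=
  (c.filter (fun l => l.1 == w && isFree f l)).map (fun l => (i, l.2))

def occFrom (f : PySem.Dict Int Int) : Nat → List (List (Int × Int)) → Int → List (Nat × Int)
  | _, [], _ => []
  | i, c :: cs, w => clauseOcc f i c w ++ occFrom f (i + 1) cs w

def satcond (val t : Int) : Bool := (t == 1 && val == 1) || (t == -1 && val == 0)

def gstep (v val : Int) (q : Bool × Int × Int × Int) (t : Int) : Bool × Int × Int × Int :=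
  (q.1 || satcond val t, q.2.1 - 1, q.2.2.1 - v, q.2.2.2 - t)

-- f' extends f: every existing binding persists (both programs only insert fresh keys)
def DExt (f f' : PySem.Dict Int Int) : Prop := ∀ v fv, f.get? v = some fv → f'.get? v = some fv

theorem DExt.rfl' (f : PySem.Dict Int Int) : DExt f f := fun _ _ h => h

theorem DExt.trans' {f g h : PySem.Dict Int Int} (h1 : DExt f g) (h2 : DExt g h) : DExt f h :=
  fun v fv hv => h2 v fv (h1 v fv hv)

theorem DExt.insert_fresh (f : PySem.Dict Int Int) (v x : Int) (hv : f.get? v = none) :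
    DExt f (f.insert v x) := by
  intro w fw hw
  rcases eq_or_ne w v with rfl | hne
  · simp [hv] at hw
  · rw [PySem.Dict.get?_insert_of_ne _ _ hne]; exact hw

theorem DExt.none_of_none {f g : PySem.Dict Int Int} (h : DExt f g) {v : Int}
    (hv : g.get? v = none) : f.get? v = none := by
  cases hf : f.get? v with
  | none => rfl
  | some x => rw [h v x hf] at hv; cases hv

-- A's inner loop computes (any litSat, filter isFree)
theorem aScan_spec (f : PySem.Dict Int Int) :
    ∀ c, (aScan f c).1 = c.any (litSat f) ∧
      (c.any (litSat f) = false → (aScan f c).2 = freeL f c) := by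
  intro c
  induction c with
  | nil => simp [aScan, freeL]
  | cons l rest ih =>
    obtain ⟨v, s⟩ := l
    cases hf : f.get? v with
    | some fv =>
      have hs : litSat f (v, s) = ((s == 1 && fv == 1) || (s == -1 && fv == 0)) := by
        unfold litSat; rw [hf]
      have hfr : isFree f (v, s) = false := by
        unfold isFree; rw [PySem.Dict.contains_eq_isSome_get?, hf]; rfl
      by_cases hc : ((s == 1 && fv == 1) || (s == -1 && fv == 0)) = true
      · constructor
        · simp [aScan, hf, hc, List.any_cons, hs]
        · intro hany
          rw [List.any_cons, hs, hc] at hany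
          simp at hany
      · have hc' : ((s == 1 && fv == 1) || (s == -1 && fv == 0)) = false := by
          simpa using hc
        constructor
        · simp [aScan, hf, hc', List.any_cons, hs, ih.1]
        · intro hany
          rw [List.any_cons, hs, hc', Bool.false_or] at hany
          simp [aScan, hf, hc', freeL, List.filter_cons, hfr]
          simpa [freeL] using ih.2 hany
    | none =>
      have hs : litSat f (v, s) = false := by unfold litSat; rw [hf]
      have hfr : isFree f (v, s) = true := by
        unfold isFree; rw [PySem.Dict.contains_eq_isSome_get?, hf]; rfl
      constructor
      · simp [aScan, hf, List.any_cons, hs, ih.1]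
      · intro hany
        rw [List.any_cons, hs, Bool.false_or] at hany
        simp [aScan, hf, freeL, List.filter_cons, hfr]
        simpa [freeL] using ih.2 hany

-- B's init
theorem scan_fold_fst (f : PySem.Dict Int Int) (i : Nat) :
    ∀ (c : List (Int × Int)) (a : Bool × Int × Int × Int)
      (occ : PySem.Dict Int (List (Nat × Int))),
      (c.foldl (bScanLit f i) (a, occ)).1 =
        (a.1 || c.any (litSat f), a.2.1 + ((freeL f c).length : Int),
         a.2.2.1 + ((freeL f c).map (·.1)).sum, a.2.2.2 + ((freeL f c).map (·.2)).sum) := by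
  intro c
  induction c with
  | nil => intro a occ; simp [freeL]
  | cons l rest ih =>
    intro a occ
    rw [List.foldl_cons]
    cases hf : f.get? l.1 with
    | some fv =>
      have hs : litSat f l = ((l.2 == 1 && fv == 1) || (l.2 == -1 && fv == 0)) := by
        unfold litSat; rw [hf]
      have hfr : isFree f l = false := by
        unfold isFree; rw [PySem.Dict.contains_eq_isSome_get?, hf]; rfl
      by_cases hc : ((l.2 == 1 && fv == 1) || (l.2 == -1 && fv == 0)) = true
      · simp [bScanLit, hf, hc, ih, freeL, List.filter_cons, hfr, List.any_cons, hs]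
      · have hc' : ((l.2 == 1 && fv == 1) || (l.2 == -1 && fv == 0)) = false := by
          simpa using hc
        simp [bScanLit, hf, hc', ih, freeL, List.filter_cons, hfr, List.any_cons, hs]
    | none =>
      have hs : litSat f l = false := by unfold litSat; rw [hf]
      have hfr : isFree f l = true := by
        unfold isFree; rw [PySem.Dict.contains_eq_isSome_get?, hf]; rfl
      simp only [bScanLit, hf, ih, freeL, List.filter_cons, hfr, List.any_cons, hs,
        Bool.false_or, List.length_cons, List.map_cons, List.sum_cons, Prod.mk.injEq]
      and_intros <;> first | trivial | (push_cast [List.length_cons, List.map_cons, List.sum_cons]; ring)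

theorem scan_fold_snd (f : PySem.Dict Int Int) (i : Nat) :
    ∀ (c : List (Int × Int)) (a : Bool × Int × Int × Int)
      (occ : PySem.Dict Int (List (Nat × Int))) (w : Int),
      ((c.foldl (bScanLit f i) (a, occ)).2).getD w [] =
        occ.getD w [] ++ clauseOcc f i c w := by
  intro c
  induction c with
  | nil => intro a occ w; simp [clauseOcc]
  | cons l rest ih =>
    intro a occ w
    rw [List.foldl_cons]
    cases hf : f.get? l.1 with
    | some fv =>
      have hfr : isFree f l = false := by
        unfold isFree; rw [PySem.Dict.contains_eq_isSome_get?, hf]; rfl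
      by_cases hc : ((l.2 == 1 && fv == 1) || (l.2 == -1 && fv == 0)) = true
      · simp [bScanLit, hf, hc, ih, clauseOcc, List.filter_cons, hfr]
      · have hc' : ((l.2 == 1 && fv == 1) || (l.2 == -1 && fv == 0)) = false := by
          simpa using hc
        simp [bScanLit, hf, hc', ih, clauseOcc, List.filter_cons, hfr]
    | none =>
      have hfr : isFree f l = true := by
        unfold isFree; rw [PySem.Dict.contains_eq_isSome_get?, hf]; rfl
      simp only [bScanLit, hf, ih, clauseOcc, List.filter_cons, hfr, Bool.and_true]
      rcases eq_or_ne l.1 w with rfl | hne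
      · simp [PySem.Dict.getD_insert, clauseOcc]
      · have : (l.1 == w) = false := by simpa using hne
        simp [PySem.Dict.getD_insert, hne.symm, this, clauseOcc]

theorem bInit_spec (f : PySem.Dict Int Int) :
    ∀ (cs : List (List (Int × Int))) (i : Nat) (st : List (Bool × Int × Int × Int))
      (occ : PySem.Dict Int (List (Nat × Int))),
      (bInit f i cs st occ).1 = st ++ cs.map (spec1 f) ∧
      ∀ w, ((bInit f i cs st occ).2).getD w [] = occ.getD w [] ++ occFrom f i cs w := by
  intro cs
  induction cs with
  | nil => intro i st occ; simp [bInit, occFrom]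
  | cons c cs ih =>
    intro i st occ
    simp only [bInit]
    obtain ⟨ih1, ih2⟩ := ih (i + 1) (st ++ [(c.foldl (bScanLit f i) ((false, 0, 0, 0), occ)).1])
      (c.foldl (bScanLit f i) ((false, 0, 0, 0), occ)).2
    constructor
    · rw [ih1, scan_fold_fst f i c (false, 0, 0, 0) occ]
      simp [spec1, List.append_assoc]
    · intro w
      rw [ih2 w, scan_fold_snd f i c (false, 0, 0, 0) occ w, occFrom, List.append_assoc]

-- the update fold, localized to one index
theorem bUpd_fold_length (v val : Int) :
    ∀ (L : List (Nat × Int)) (st : List (Bool × Int × Int × Int)),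
      (L.foldl (bUpd v val) st).length = st.length := by
  intro L
  induction L with
  | nil => intro st; rfl
  | cons p L ih => intro st; rw [List.foldl_cons, ih, bUpd, List.length_modify]

theorem bUpd_fold_getD (v val : Int) (d : Bool × Int × Int × Int) :
    ∀ (L : List (Nat × Int)) (st : List (Bool × Int × Int × Int)) (j : Nat),
      j < st.length →
      (L.foldl (bUpd v val) st).getD j d =
        ((L.filter (fun p => p.1 == j)).map (·.2)).foldl (gstep v val) (st.getD j d) := by
  intro L
  induction L with
  | nil => intro st j h; rfl
  | cons p L ih =>
    intro st j h
    rw [List.foldl_cons, List.filter_cons]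
    have hlen : j < (bUpd v val st p).length := by rw [bUpd, List.length_modify]; exact h
    rw [ih (bUpd v val st p) j hlen]
    have hstep : (bUpd v val st p).getD j d =
        if p.1 = j then gstep v val (st.getD j d) p.2 else st.getD j d := by
      rw [bUpd, List.getD_eq_getElem _ _ (by rw [List.length_modify]; exact h),
          List.getElem_modify, List.getD_eq_getElem _ _ h]
      split
      · rfl
      · rfl
    by_cases hpj : p.1 = j
    · have hb : (p.1 == j) = true := by simpa using hpj
      rw [hb, hstep, if_pos hpj]
      rfl
    · have hb : (p.1 == j) = false := by simpa using hpj
      rw [hb, hstep, if_neg hpj]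
      simp

theorem gstep_fold (v val : Int) :
    ∀ (ts : List Int) (q : Bool × Int × Int × Int),
      ts.foldl (gstep v val) q =
        (q.1 || ts.any (satcond val), q.2.1 - ts.length, q.2.2.1 - v * ts.length,
         q.2.2.2 - ts.sum) := by
  intro ts
  induction ts with
  | nil => intro q; simp
  | cons t ts ih =>
    intro q
    rw [List.foldl_cons, ih]
    simp only [gstep, List.any_cons, List.length_cons, List.sum_cons, Prod.mk.injEq]
    refine ⟨by rw [Bool.or_assoc], by push_cast; ring, by push_cast; ring, by ring⟩

-- indices in occFrom start at k
theorem occFrom_filter_lt (f : PySem.Dict Int Int) (w : Int) (j : Nat) :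
    ∀ (cs : List (List (Int × Int))) (k : Nat), j < k →
      (occFrom f k cs w).filter (fun p => p.1 == j) = [] := by
  intro cs
  induction cs with
  | nil => intro k _; rfl
  | cons c cs ih =>
    intro k hk
    rw [occFrom, List.filter_append, ih (k + 1) (by omega), List.append_nil]
    apply List.filter_eq_nil_iff.mpr
    intro p hp
    rw [clauseOcc] at hp
    rcases List.mem_map.mp hp with ⟨l, _, rfl⟩
    have : ¬ k = j := by omega
    simpa using this

theorem occFrom_filter (f : PySem.Dict Int Int) (w : Int) (j : Nat) :
    ∀ (cs : List (List (Int × Int))) (k : Nat) (hk : k ≤ j) (hj : j - k < cs.length),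
      (occFrom f k cs w).filter (fun p => p.1 == j) = clauseOcc f j cs[j - k] w := by
  intro cs
  induction cs with
  | nil => intro k hk hj; simp at hj
  | cons c cs ih =>
    intro k hk hj
    rw [occFrom, List.filter_append]
    by_cases hkj : k = j
    · subst hkj
      rw [occFrom_filter_lt f w k cs (k + 1) (by omega), List.append_nil]
      have : (clauseOcc f k c w).filter (fun p => p.1 == k) = clauseOcc f k c w := by
        apply List.filter_eq_self.mpr
        intro p hp
        rcases List.mem_map.mp hp with ⟨l, _, rfl⟩
        simp
      rw [this]
      simp
    · have hk1 : k + 1 ≤ j := by omega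
      have hcl : (clauseOcc f k c w).filter (fun p => p.1 == j) = [] := by
        apply List.filter_eq_nil_iff.mpr
        intro p hp
        rcases List.mem_map.mp hp with ⟨l, _, rfl⟩
        simpa using hkj
      rw [hcl, List.nil_append]
      have hj1 : j - (k + 1) < cs.length := by
        simp only [List.length_cons] at hj; omega
      rw [ih (k + 1) hk1 hj1]
      have hm : j - k = (j - (k + 1)) + 1 := by omega
      simp only [hm, List.getElem_cons_succ]

-- v unassigned everywhere: the init-free condition in its occurrence list is vacuous
theorem clause_filter_free (f : PySem.Dict Int Int) (v : Int) (hv : f.get? v = none)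
    (c : List (Int × Int)) :
    c.filter (fun l => l.1 == v && isFree f l) = c.filter (fun l => l.1 == v) := by
  apply List.filter_congr
  intro l _
  by_cases hl : l.1 = v
  · have h1 : (l.1 == v) = true := by simpa using hl
    have h2 : isFree f l = true := by
      unfold isFree; rw [PySem.Dict.contains_eq_isSome_get?, hl, hv]; rfl
    rw [h1, h2]; rfl
  · have h1 : (l.1 == v) = false := by simpa using hl
    rw [h1]; rfl

-- how one fresh binding changes a clause record
theorem spec1_insert (f : PySem.Dict Int Int) (v val : Int) (hv : f.get? v = none)
    (c : List (Int × Int)) :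
    c.any (litSat (f.insert v val)) =
      (c.any (litSat f) || ((c.filter (fun l => l.1 == v)).map (·.2)).any (satcond val)) ∧
    ((freeL f c).length : Int) =
      ((freeL (f.insert v val) c).length : Int) + (c.filter (fun l => l.1 == v)).length ∧
    ((freeL f c).map (·.1)).sum =
      ((freeL (f.insert v val) c).map (·.1)).sum + v * (c.filter (fun l => l.1 == v)).length ∧
    ((freeL f c).map (·.2)).sum =
      ((freeL (f.insert v val) c).map (·.2)).sum +
        ((c.filter (fun l => l.1 == v)).map (·.2)).sum := by
  simp only [freeL]
  induction c with
  | nil => simp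
  | cons l c ih =>
    obtain ⟨ih1, ih2, ih3, ih4⟩ := ih
    by_cases hl : l.1 = v
    · have hfv : f.get? l.1 = none := by rw [hl]; exact hv
      have hs : litSat f l = false := by unfold litSat; rw [hfv]
      have hs' : litSat (f.insert v val) l = satcond val l.2 := by
        unfold litSat satcond; rw [hl, PySem.Dict.get?_insert_self]
      have hfr : isFree f l = true := by
        unfold isFree; rw [PySem.Dict.contains_eq_isSome_get?, hfv]; rfl
      have hfr' : isFree (f.insert v val) l = false := by
        unfold isFree; rw [PySem.Dict.contains_insert]; simp [hl]
      have hb : (l.1 == v) = true := by simpa using hl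
      refine ⟨?_, ?_, ?_, ?_⟩
      · simp only [List.filter_cons, hfr, hfr', hb, hs, hs', List.any_cons,
          List.map_cons, Bool.false_or, if_true, ih1, List.any_cons]
        simp [Bool.or_assoc, Bool.or_comm, Bool.or_left_comm]
      · simp only [List.filter_cons, hfr, hfr', hb, if_true, List.length_cons]
        push_cast
        omega
      · simp only [List.filter_cons, hfr, hfr', hb, if_true, List.map_cons,
          List.sum_cons, List.length_cons]
        push_cast
        linear_combination ih3 + hl
      · simp only [List.filter_cons, hfr, hfr', hb, if_true, List.map_cons,
          List.sum_cons, Bool.false_eq_true, if_false]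
        linear_combination ih4
    · have hget : (f.insert v val).get? l.1 = f.get? l.1 :=
        PySem.Dict.get?_insert_of_ne _ _ hl
      have hs' : litSat (f.insert v val) l = litSat f l := by
        unfold litSat; rw [hget]
      have hb : (l.1 == v) = false := by simpa using hl
      have hfr' : isFree (f.insert v val) l = isFree f l := by
        unfold isFree; rw [PySem.Dict.contains_insert, hb, Bool.false_or]
      refine ⟨?_, ?_, ?_, ?_⟩
      · simp only [List.any_cons, List.filter_cons, hs', ih1, hb]
        simp [Bool.or_assoc, Bool.or_comm, Bool.or_left_comm]
      · cases hfree : isFree f l <;>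
          simp only [List.filter_cons, hfree, hfr', hb, if_true, if_false,
            List.length_cons] <;>
          push_cast <;> omega
      · cases hfree : isFree f l <;>
          simp only [List.filter_cons, hfree, hfr', hb, if_true, if_false,
            List.map_cons, List.sum_cons, List.length_cons] <;>
          push_cast <;> linear_combination ih3
      · cases hfree : isFree f l <;>
          simp only [List.filter_cons, hfree, hfr', hb, if_true, if_false,
            List.map_cons, List.sum_cons] <;>
          push_cast <;> linear_combination ih4

-- the master update lemma: B's occurrence fold re-establishes the record invariant
theorem upd_master (f0 f : PySem.Dict Int Int) (clauses : List (List (Int × Int)))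
    (occ : PySem.Dict Int (List (Nat × Int)))
    (hocc : ∀ w, occ.getD w [] = occFrom f0 0 clauses w)
    (hext : DExt f0 f) (v val : Int) (hv : f.get? v = none) :
    (occ.getD v []).foldl (bUpd v val) (clauses.map (spec1 f)) =
      clauses.map (spec1 (f.insert v val)) := by
  rw [hocc v]
  have hv0 : f0.get? v = none := DExt.none_of_none hext hv
  apply List.ext_getElem
  · rw [bUpd_fold_length, List.length_map, List.length_map]
  · intro j h1 h2
    have hj : j < clauses.length := by simpa using h2
    have hjs : j < (clauses.map (spec1 f)).length := by simpa using hj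
    have e1 : (List.foldl (bUpd v val) (clauses.map (spec1 f)) (occFrom f0 0 clauses v))[j]'h1 =
        (((occFrom f0 0 clauses v).filter (fun p => p.1 == j)).map (·.2)).foldl (gstep v val)
          ((clauses.map (spec1 f)).getD j (true, 0, 0, 0)) := by
      rw [← List.getD_eq_getElem _ (true, 0, 0, 0) h1,
        bUpd_fold_getD v val (true, 0, 0, 0) (occFrom f0 0 clauses v) (clauses.map (spec1 f)) j hjs]
    rw [e1, occFrom_filter f0 v j clauses 0 (Nat.zero_le j) (by simpa using hj)]
    simp only [Nat.sub_zero, clauseOcc, List.map_map, Function.comp_def,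
      clause_filter_free f0 v hv0 clauses[j]]
    rw [List.getD_eq_getElem _ _ hjs, List.getElem_map, List.getElem_map, gstep_fold]
    obtain ⟨e_any, e_len, e_sv, e_ss⟩ := spec1_insert f v val hv clauses[j]
    simp only [spec1, Prod.mk.injEq]
    refine ⟨?_, ?_, ?_, ?_⟩
    · rw [e_any]
    · simp only [List.length_map]
      simp only [freeL] at e_len ⊢
      omega
    · simp only [List.length_map]
      simp only [freeL] at e_sv ⊢
      linear_combination e_sv
    · simp only [freeL] at e_ss ⊢
      linear_combination e_ss

-- one pass of A vs one pass of B over the records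
theorem pass_eq (f0 : PySem.Dict Int Int) (clauses : List (List (Int × Int)))
    (occ : PySem.Dict Int (List (Nat × Int)))
    (hocc : ∀ w, occ.getD w [] = occFrom f0 0 clauses w) :
    ∀ (l k : Nat) (f : PySem.Dict Int Int) (forced : Int) (changed : Bool),
      k + l = clauses.length → DExt f0 f →
      bPass occ (List.range' k l) f forced changed (clauses.map (spec1 f)) =
        ((aPass f forced changed (clauses.drop k)).1,
         (aPass f forced changed (clauses.drop k)).2.1,
         (aPass f forced changed (clauses.drop k)).2.2,
         clauses.map (spec1 (aPass f forced changed (clauses.drop k)).1)) ∧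
      DExt f0 (aPass f forced changed (clauses.drop k)).1 := by
  intro l
  induction l with
  | zero =>
    intro k f forced changed hk hext
    have hd : clauses.drop k = [] := List.drop_of_length_le (by omega)
    rw [hd]
    exact ⟨rfl, hext⟩
  | succ l ih =>
    intro k f forced changed hk hext
    have hklt : k < clauses.length := by omega
    have hd : clauses.drop k = clauses[k] :: clauses.drop (k + 1) :=
      (List.getElem_cons_drop hklt).symm
    have hq : (clauses.map (spec1 f)).getD k (true, 0, 0, 0) = spec1 f clauses[k] := by
      rw [List.getD_eq_getElem _ _ (by simpa using hklt), List.getElem_map]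
    rw [hd, List.range'_succ]
    simp only [bPass, aPass, hq]
    have hscan1 := (aScan_spec f clauses[k]).1
    cases hany : clauses[k].any (litSat f) with
    | true =>
      have h1 : (aScan f clauses[k]).1 = true := hscan1.trans hany
      simp only [spec1, hany, h1, Bool.not_true, Bool.false_and, Bool.if_false_left]
      simpa using ih (k + 1) f forced changed (by omega) hext
    | false =>
      have h1 : (aScan f clauses[k]).1 = false := hscan1.trans hany
      have h2 : (aScan f clauses[k]).2 = freeL f clauses[k] := (aScan_spec f clauses[k]).2 hany
      by_cases hlen : (freeL f clauses[k]).length = 1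
      · obtain ⟨l0, hF⟩ := List.length_eq_one_iff.mp hlen
        have hmem : l0 ∈ freeL f clauses[k] := by rw [hF]; exact List.mem_singleton.mpr rfl
        have hfree : isFree f l0 = true := List.of_mem_filter hmem
        have hnone : f.get? l0.1 = none := by
          unfold isFree at hfree
          rw [PySem.Dict.contains_eq_isSome_get?] at hfree
          cases hg : f.get? l0.1 with
          | none => rfl
          | some x => rw [hg] at hfree; simp at hfree
        have hcond : (((↑(freeL f clauses[k]).length : Int) == 1) = true) := by
          simp [hlen]
        simp only [spec1, hany, h1, h2, hF, Bool.not_false, Bool.true_and, hcond,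
          List.map_cons, List.map_nil, List.sum_cons, List.sum_nil, List.length_cons,
          List.length_nil, if_true, hnone, Option.isNone_none]
        have hsum1 : l0.1 + 0 = l0.1 := by ring
        have hsum2 : l0.2 + 0 = l0.2 := by ring
        rw [hsum1, hsum2]
        have hupd := upd_master f0 f clauses occ hocc hext l0.1
          (if l0.2 == 1 then 1 else 0) hnone
        rw [hupd]
        have hext' : DExt f0 (f.insert l0.1 (if l0.2 == 1 then 1 else 0)) :=
          DExt.trans' hext (DExt.insert_fresh f l0.1 _ hnone)
        have := ih (k + 1) (f.insert l0.1 (if l0.2 == 1 then 1 else 0)) (forced + 1) true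
          (by omega) hext'
        simpa using this
      · have hcond : (((↑(freeL f clauses[k]).length : Int) == 1) = false) := by
          simp; omega
        have hcond2 : ((aScan f clauses[k]).2.length == 1) = false := by
          rw [h2]; simp; omega
        simp only [spec1, hany, h1, hcond, hcond2, Bool.not_false, Bool.true_and,
          Bool.and_false, Bool.false_and, if_false, Bool.false_eq_true]
        simpa using ih (k + 1) f forced changed (by omega) hext

theorem loop_eq (f0 : PySem.Dict Int Int) (clauses : List (List (Int × Int)))
    (occ : PySem.Dict Int (List (Nat × Int)))
    (hocc : ∀ w, occ.getD w [] = occFrom f0 0 clauses w) :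
    ∀ (fuel : Nat) (f : PySem.Dict Int Int) (forced : Int), DExt f0 f →
      bLoop occ fuel f forced (clauses.map (spec1 f)) = aLoop clauses fuel f forced := by
  intro fuel
  induction fuel with
  | zero => intro f forced _; rfl
  | succ fuel ih =>
    intro f forced hext
    simp only [bLoop, aLoop, List.length_map]
    obtain ⟨hp, hext'⟩ := pass_eq f0 clauses occ hocc clauses.length 0 f forced false
      (by omega) hext
    rw [List.drop_zero] at hp hext'
    rw [← List.range_eq_range'] at hp
    rw [hp]
    cases hch : (aPass f forced false clauses).2.2 with
    | true => simpa using ih _ _ hext'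
    | false => simp

-- ===== VERDICT (by name: the statement is the Claim_ definition above) =====
theorem count_up_spec : Claim_equal_count_up := by
  intro clauses nn fixed _
  unfold Spec_count_up
  simp only [count_up, count_up_alt]
  obtain ⟨h1, h2⟩ :=
    bInit_spec (PySem.Dict.ofList fixed) clauses 0 [] PySem.Dict.empty
  rw [h1, List.nil_append]
  rw [loop_eq (PySem.Dict.ofList fixed) clauses _
        (fun w => by rw [h2 w, PySem.Dict.getD_empty, List.nil_append])
        _ _ _ (DExt.rfl' _)]
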